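-- pv_equiv track=rewrite | github.com/baisiyou/health | Model/app/main.py | _infer_l3_label
-- ===== SOURCE A (Python) =====
-- DISEASE_TAXONOMY = {
--     "Cardiovascular Disease": {
--         "L1": "Cardiovascular",
--         "L2": "Coronary/Cardiac",
--         "L3_rules": [
--             {"if_symptoms_any": ["chest pain", "chest tightness", "angina"], "label": "Angina"},
--             {"if_symptoms_any": ["shortness of breath", "palpitations"], "label": "Arrhythmia"},
--         ],
--         "default_L3": "Cardiac condition"
--     },
--     "Hypertension": {
--         "L1": "Cardiovascular",
--         "L2": "Hypertension",
--         "L3_rules": [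
--             {"if_symptoms_any": ["headache", "dizziness"], "label": "Hypertensive disorder"}
--         ],
--         "default_L3": "Essential hypertension"
--     },
--     "Diabetes": {
--         "L1": "Endocrine",
--         "L2": "Diabetes",
--         "L3_rules": [
--             {"if_symptoms_any": ["excessive thirst", "frequent urination", "increased hunger"], "label": "Type 2 diabetes"}
--         ],
--         "default_L3": "Diabetes (unspecified)"
--     },
--     "Ophthalmic Disorder": {
--         "L1": "Ophthalmology",
--         "L2": "Neuro-ophthalmic",
--         "L3_rules": [
--             {"if_symptoms_any": ["diplopia", "double vision", "ptosis"], "label": "Ocular motor dysfunction"}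
--         ],
--         "default_L3": "Eye disorder"
--     },
--     "Neurological Disorder": {
--         "L1": "Neurology",
--         "L2": "Neuromuscular/CNS",
--         "L3_rules": [
--             {"if_symptoms_any": ["weakness", "numbness", "tingling"], "label": "Peripheral neuropathy"},
--             {"if_symptoms_any": ["seizure", "epilepsy"], "label": "Epilepsy"}
--         ],
--         "default_L3": "Neurological disorder"
--     },
--     "Autoimmune Disorder": {
--         "L1": "Immunology",
--         "L2": "Autoimmune",
--         "L3_rules": [
--             {"if_symptoms_any": ["steroid", "prednisone", "inflammation"], "label": "Steroid-responsive autoimmune"}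
--         ],
--         "default_L3": "Autoimmune disorder"
--     }
-- }
--
-- def _infer_l3_label(disease: str, symptoms: list) -> str:
--     taxonomy = DISEASE_TAXONOMY.get(disease)
--     if not taxonomy:
--         return disease
--     normalized = [s.lower() for s in symptoms]
--     for rule in taxonomy.get("L3_rules", []):
--         if any(keyword in normalized for keyword in [k.lower() for k in rule.get("if_symptoms_any", [])]):
--             return rule.get("label", taxonomy.get("default_L3", disease))
--     return taxonomy.get("default_L3", disease)
-- ===== SOURCE B (Python) =====
-- # Keyword-index table: each disease maps to (default_L3, {lowercased keyword -> (rule_index, label)}).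
-- # A single pass over the symptoms keeps the minimum matching rule index (earliest rule wins).
-- _KEYWORD_TABLE = {
--     "Cardiovascular Disease": ("Cardiac condition", {
--         "chest pain": (0, "Angina"), "chest tightness": (0, "Angina"), "angina": (0, "Angina"),
--         "shortness of breath": (1, "Arrhythmia"), "palpitations": (1, "Arrhythmia")}),
--     "Hypertension": ("Essential hypertension", {
--         "headache": (0, "Hypertensive disorder"), "dizziness": (0, "Hypertensive disorder")}),
--     "Diabetes": ("Diabetes (unspecified)", {
--         "excessive thirst": (0, "Type 2 diabetes"), "frequent urination": (0, "Type 2 diabetes"),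
--         "increased hunger": (0, "Type 2 diabetes")}),
--     "Ophthalmic Disorder": ("Eye disorder", {
--         "diplopia": (0, "Ocular motor dysfunction"), "double vision": (0, "Ocular motor dysfunction"),
--         "ptosis": (0, "Ocular motor dysfunction")}),
--     "Neurological Disorder": ("Neurological disorder", {
--         "weakness": (0, "Peripheral neuropathy"), "numbness": (0, "Peripheral neuropathy"),
--         "tingling": (0, "Peripheral neuropathy"),
--         "seizure": (1, "Epilepsy"), "epilepsy": (1, "Epilepsy")}),
--     "Autoimmune Disorder": ("Autoimmune disorder", {
--         "steroid": (0, "Steroid-responsive autoimmune"), "prednisone": (0, "Steroid-responsive autoimmune"),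
--         "inflammation": (0, "Steroid-responsive autoimmune")}),
-- }
--
--
-- def _infer_l3_label(disease: str, symptoms: list) -> str:
--     entry = _KEYWORD_TABLE.get(disease)
--     if entry is None:
--         return disease
--     default, table = entry
--     best = None
--     for s in symptoms:
--         hit = table.get(s.lower())
--         if hit is not None and (best is None or hit[0] < best[0]):
--             best = hit
--     return default if best is None else best[1]
-- ===== Notes on version B (the rewrite author's own statement) =====
-- stated objective: alternative
-- what changed: Replaces A's rule-major scan over the nested taxonomy (for each rule, test whether any lowered keyword occurs in the symptom list) with a flat keyword->(rule_index,label) index table consulted once per lowered symptom, keeping the running minimum rule index (earliest rule wins) and returning that rule's label or default_L3.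
import Mathlib
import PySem

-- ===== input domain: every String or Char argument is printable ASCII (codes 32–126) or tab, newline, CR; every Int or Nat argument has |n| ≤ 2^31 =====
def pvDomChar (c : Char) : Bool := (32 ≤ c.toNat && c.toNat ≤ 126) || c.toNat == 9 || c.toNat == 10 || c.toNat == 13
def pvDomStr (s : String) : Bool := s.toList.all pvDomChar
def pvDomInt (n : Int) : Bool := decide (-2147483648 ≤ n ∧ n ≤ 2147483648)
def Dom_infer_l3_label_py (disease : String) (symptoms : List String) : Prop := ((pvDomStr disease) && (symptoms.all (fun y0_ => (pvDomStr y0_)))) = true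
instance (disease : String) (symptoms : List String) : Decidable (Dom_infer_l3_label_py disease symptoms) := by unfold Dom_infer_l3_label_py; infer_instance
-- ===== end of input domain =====

-- B replaces A's rule-major scan over the nested taxonomy by a flat keyword→(rule index, label)
-- index table consulted once per symptom, keeping the running minimum rule index; objective:
-- alternative data structure, same result.

-- ===== PORT A =====
-- module constant DISEASE_TAXONOMY; each entry: (L1, L2, L3_rules as (keywords, label) pairs, default_L3)
structure PvTaxonomy where
  l1 : String
  l2 : String
  rules : List (List String × String)
  defaultL3 : String
deriving Repr, DecidableEq

def PV_DISEASE_TAXONOMY : PySem.Dict String PvTaxonomy :=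
  PySem.Dict.ofList
    [ ("Cardiovascular Disease",
        ⟨"Cardiovascular", "Coronary/Cardiac",
          [(["chest pain", "chest tightness", "angina"], "Angina"),
           (["shortness of breath", "palpitations"], "Arrhythmia")],
          "Cardiac condition"⟩),
      ("Hypertension",
        ⟨"Cardiovascular", "Hypertension",
          [(["headache", "dizziness"], "Hypertensive disorder")],
          "Essential hypertension"⟩),
      ("Diabetes",
        ⟨"Endocrine", "Diabetes",
          [(["excessive thirst", "frequent urination", "increased hunger"], "Type 2 diabetes")],
          "Diabetes (unspecified)"⟩),
      ("Ophthalmic Disorder",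
        ⟨"Ophthalmology", "Neuro-ophthalmic",
          [(["diplopia", "double vision", "ptosis"], "Ocular motor dysfunction")],
          "Eye disorder"⟩),
      ("Neurological Disorder",
        ⟨"Neurology", "Neuromuscular/CNS",
          [(["weakness", "numbness", "tingling"], "Peripheral neuropathy"),
           (["seizure", "epilepsy"], "Epilepsy")],
          "Neurological disorder"⟩),
      ("Autoimmune Disorder",
        ⟨"Immunology", "Autoimmune",
          [(["steroid", "prednisone", "inflammation"], "Steroid-responsive autoimmune")],
          "Autoimmune disorder"⟩) ]

-- A's rule loop: first rule any of whose lowercased keywords occurs in `normalized` wins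
def pvRuleLoopA (normalized : List String) (dflt : String) : List (List String × String) → String
  | [] => dflt
  | (kws, lbl) :: rest =>
      if (kws.map PySem.Str.lower).any (fun keyword => normalized.contains keyword) then lbl
      else pvRuleLoopA normalized dflt rest

def infer_l3_label_py (disease : String) (symptoms : List String) : String :=
  match PySem.Dict.get? PV_DISEASE_TAXONOMY disease with
  | none => disease
  | some taxonomy =>
      let normalized := symptoms.map PySem.Str.lower
      pvRuleLoopA normalized taxonomy.defaultL3 taxonomy.rules

-- ===== PORT B =====
-- module constant _KEYWORD_TABLE: disease -> (default_L3, keyword -> (rule index, label))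
def PV_KEYWORD_TABLE : PySem.Dict String (String × PySem.Dict String (Nat × String)) :=
  PySem.Dict.ofList
    [ ("Cardiovascular Disease",
        ("Cardiac condition", PySem.Dict.ofList
          [("chest pain", (0, "Angina")), ("chest tightness", (0, "Angina")),
           ("angina", (0, "Angina")),
           ("shortness of breath", (1, "Arrhythmia")), ("palpitations", (1, "Arrhythmia"))])),
      ("Hypertension",
        ("Essential hypertension", PySem.Dict.ofList
          [("headache", (0, "Hypertensive disorder")), ("dizziness", (0, "Hypertensive disorder"))])),
      ("Diabetes",
        ("Diabetes (unspecified)", PySem.Dict.ofList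
          [("excessive thirst", (0, "Type 2 diabetes")), ("frequent urination", (0, "Type 2 diabetes")),
           ("increased hunger", (0, "Type 2 diabetes"))])),
      ("Ophthalmic Disorder",
        ("Eye disorder", PySem.Dict.ofList
          [("diplopia", (0, "Ocular motor dysfunction")), ("double vision", (0, "Ocular motor dysfunction")),
           ("ptosis", (0, "Ocular motor dysfunction"))])),
      ("Neurological Disorder",
        ("Neurological disorder", PySem.Dict.ofList
          [("weakness", (0, "Peripheral neuropathy")), ("numbness", (0, "Peripheral neuropathy")),
           ("tingling", (0, "Peripheral neuropathy")),
           ("seizure", (1, "Epilepsy")), ("epilepsy", (1, "Epilepsy"))])),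
      ("Autoimmune Disorder",
        ("Autoimmune disorder", PySem.Dict.ofList
          [("steroid", (0, "Steroid-responsive autoimmune")), ("prednisone", (0, "Steroid-responsive autoimmune")),
           ("inflammation", (0, "Steroid-responsive autoimmune"))])) ]

-- body of B's `for s in symptoms` loop: look the lowered symptom up, keep the minimum rule index
def pvHitStep (table : PySem.Dict String (Nat × String)) (best : Option (Nat × String)) (s : String) :
    Option (Nat × String) :=
  match PySem.Dict.get? table (PySem.Str.lower s) with
  | none => best
  | some hit =>
      match best with
      | none => some hit
      | some b => if hit.1 < b.1 then some hit else best

def infer_l3_label_py_alt (disease : String) (symptoms : List String) : String :=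
  match PySem.Dict.get? PV_KEYWORD_TABLE disease with
  | none => disease
  | some entry =>
      match symptoms.foldl (pvHitStep entry.2) none with
      | none => entry.1
      | some best => best.2

-- ===== PRECONDITION & SPEC =====
def Spec_infer_l3_label_py (disease : String) (symptoms : List String) (out : String) : Prop := out = infer_l3_label_py_alt disease symptoms
instance (disease : String) (symptoms : List String) (out : String) : Decidable (Spec_infer_l3_label_py disease symptoms out) := by unfold Spec_infer_l3_label_py; infer_instance

-- ===== CLAIM (what is proved, stated in full; the proofs are below) =====
def Claim_equal_infer_l3_label_py : Prop := ∀ (disease : String) (symptoms : List String), Dom_infer_l3_label_py disease symptoms → Spec_infer_l3_label_py disease symptoms (infer_l3_label_py disease symptoms)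

-- ===== LEMMAS AND PROOFS =====

-- proof-only helper: first rule (from index i) whose keyword list contains s
def pvFind (s : String) : Nat → List (List String × String) → Option (Nat × String)
  | _, [] => none
  | i, (kws, lbl) :: rest =>
      if kws.contains s then some (i, lbl) else pvFind s (i + 1) rest

-- left-biased minimum-index combination
def pvMinOpt : Option (Nat × String) → Option (Nat × String) → Option (Nat × String)
  | b, none => b
  | none, some n => some n
  | some b, some n => if n.1 < b.1 then some n else some b

theorem pvMinOpt_none_left (b : Option (Nat × String)) : pvMinOpt none b = b := by
  cases b <;> rfl

theorem pvMinOpt_assoc (a b c : Option (Nat × String)) :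
    pvMinOpt (pvMinOpt a b) c = pvMinOpt a (pvMinOpt b c) := by
  rcases a with _ | a <;> rcases b with _ | b <;> rcases c with _ | c <;>
    simp only [pvMinOpt] <;> repeat (first | rfl | omega | (split_ifs <;> simp_all))

theorem pvHitStep_eq (table : PySem.Dict String (Nat × String)) (b : Option (Nat × String)) (s : String) :
    pvHitStep table b s = pvMinOpt b (PySem.Dict.get? table (PySem.Str.lower s)) := by
  unfold pvHitStep
  rcases PySem.Dict.get? table (PySem.Str.lower s) with _ | hit <;> rcases b with _ | b <;>
    simp [pvMinOpt]

def pvBmin (f : String → Option (Nat × String)) (norm : List String) : Option (Nat × String) :=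
  norm.foldl (fun b s => pvMinOpt b (f s)) none

theorem pvBmin_acc (f : String → Option (Nat × String)) (norm : List String)
    (acc : Option (Nat × String)) :
    norm.foldl (fun b s => pvMinOpt b (f s)) acc = pvMinOpt acc (pvBmin f norm) := by
  induction norm generalizing acc with
  | nil => rfl
  | cons s rest ih =>
      simp only [List.foldl_cons]
      rw [ih (pvMinOpt acc (f s))]
      have hc : pvBmin f (s :: rest) = pvMinOpt (f s) (pvBmin f rest) := by
        simp only [pvBmin, List.foldl_cons]
        rw [ih (pvMinOpt none (f s)), pvMinOpt_none_left]
        exact rfl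
      rw [hc, pvMinOpt_assoc]

theorem pvBmin_cons (f : String → Option (Nat × String)) (s : String) (norm : List String) :
    pvBmin f (s :: norm) = pvMinOpt (f s) (pvBmin f norm) := by
  simp only [pvBmin, List.foldl_cons]
  rw [pvBmin_acc, pvMinOpt_none_left]
  exact rfl

theorem pvBmin_none (norm : List String) : pvBmin (fun _ => none) norm = none := by
  induction norm with
  | nil => rfl
  | cons s rest ih => rw [pvBmin_cons, ih]; rfl

theorem pvMinOpt_eq_some (a b : Option (Nat × String)) (r : Nat × String)
    (h : pvMinOpt a b = some r) : a = some r ∨ b = some r := by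
  rcases a with _ | a <;> rcases b with _ | b <;> simp only [pvMinOpt] at h
  · exact Or.inl h
  · exact Or.inr h
  · exact Or.inl h
  · split at h
    · exact Or.inr h
    · exact Or.inl h

theorem pvBmin_bound (f : String → Option (Nat × String)) (i : Nat)
    (hf : ∀ s r, f s = some r → i ≤ r.1) :
    ∀ (norm : List String) (r : Nat × String), pvBmin f norm = some r → i ≤ r.1 := by
  intro norm
  induction norm with
  | nil => intro r h; simp [pvBmin] at h
  | cons s rest ih =>
      intro r h
      rw [pvBmin_cons] at h
      rcases pvMinOpt_eq_some _ _ _ h with h' | h'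
      · exact hf s r h'
      · exact ih r h'

theorem pvFind_bound (rs : List (List String × String)) :
    ∀ (i : Nat) (s : String) (r : Nat × String), pvFind s i rs = some r → i ≤ r.1 := by
  induction rs with
  | nil => intro i s r h; simp [pvFind] at h
  | cons hd tl ih =>
      intro i s r h
      rcases hd with ⟨kws, lbl⟩
      simp only [pvFind] at h
      split at h
      · cases h; rfl
      · exact Nat.le_of_succ_le (ih (i + 1) s r h)

theorem pvAny_contains_cons (kws : List String) (s : String) (rest : List String) :
    kws.any (fun k => (s :: rest).contains k) =
      (kws.contains s || kws.any (fun k => rest.contains k)) := by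
  rw [Bool.eq_iff_iff]
  simp only [List.any_eq_true, List.contains_cons, Bool.or_eq_true, beq_iff_eq,
    List.contains_iff_mem]
  constructor
  · rintro ⟨k, hk, h | h⟩
    · exact Or.inl (h ▸ hk)
    · exact Or.inr ⟨k, hk, h⟩
  · rintro (h | ⟨k, hk, h⟩)
    · exact ⟨s, h, Or.inl rfl⟩
    · exact ⟨k, hk, Or.inr h⟩

-- key lemma: B's running minimum against a "first matching rule wins" lookup peels off the
-- first rule exactly like A's rule loop does
theorem pvBmin_peel (kws : List String) (i : Nat) (lbl : String)
    (g : String → Option (Nat × String)) (hg : ∀ s r, g s = some r → i + 1 ≤ r.1) :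
    ∀ norm : List String,
      pvBmin (fun s => if kws.contains s then some (i, lbl) else g s) norm =
        if kws.any (fun k => norm.contains k) then some (i, lbl) else pvBmin g norm := by
  intro norm
  induction norm with
  | nil => simp [pvBmin]
  | cons s rest ih =>
      rw [pvBmin_cons, ih, pvAny_contains_cons]
      by_cases hs : kws.contains s = true
      · rw [if_pos hs, hs, Bool.true_or, if_pos rfl]
        by_cases ha : kws.any (fun k => rest.contains k) = true
        · rw [if_pos ha]
          simp [pvMinOpt]
        · rw [if_neg ha]
          cases h' : pvBmin g rest with
          | none => rfl
          | some r =>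
              have hb : i + 1 ≤ r.1 := pvBmin_bound g (i + 1) hg rest r h'
              simp only [pvMinOpt]
              rw [if_neg (by omega)]
      · have hs' : kws.contains s = false := by revert hs; cases kws.contains s <;> simp
        rw [if_neg hs, hs', Bool.false_or]
        by_cases ha : kws.any (fun k => rest.contains k) = true
        · rw [if_pos ha, if_pos ha]
          cases hgs : g s with
          | none => simp [pvMinOpt]
          | some r =>
              have hb : i + 1 ≤ r.1 := hg s r hgs
              simp only [pvMinOpt]
              rw [if_pos (by omega)]
        · rw [if_neg ha, if_neg ha, pvBmin_cons]

-- A's rule loop equals the symptom-wise minimum over pvFind, for any start index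
theorem pvLoop_eq (rs : List (List String × String)) :
    ∀ (i : Nat) (dflt : String) (norm : List String),
      pvRuleLoopA norm dflt rs =
        (match pvBmin (fun s => pvFind s i (rs.map (fun r => (r.1.map PySem.Str.lower, r.2)))) norm with
          | some (_, l) => l
          | none => dflt) := by
  induction rs with
  | nil =>
      intro i dflt norm
      simp [pvRuleLoopA, pvFind, pvBmin_none]
  | cons hd tl ih =>
      intro i dflt norm
      rcases hd with ⟨kws, lbl⟩
      have hstep :
          (fun s => pvFind s i (((kws, lbl) :: tl).map (fun r => (r.1.map PySem.Str.lower, r.2)))) =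
            (fun s => if (kws.map PySem.Str.lower).contains s then some (i, lbl)
              else pvFind s (i + 1) (tl.map (fun r => (r.1.map PySem.Str.lower, r.2)))) := by
        funext s
        simp [pvFind]
      rw [hstep, pvBmin_peel _ _ _ _
        (fun s r h => pvFind_bound (tl.map (fun r => (r.1.map PySem.Str.lower, r.2))) (i + 1) s r h)]
      simp only [pvRuleLoopA]
      by_cases hc : ((kws.map PySem.Str.lower).any fun keyword => norm.contains keyword) = true
      · rw [if_pos hc, if_pos hc]
      · rw [if_neg hc, if_neg hc, ih (i + 1) dflt norm]

-- B's whole computation for one taxonomy entry equals A's rule loop, given the keyword table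
-- looks up symptoms like pvFind does on the (lowered) rules
theorem pvEntry_eq (rules : List (List String × String)) (dflt : String)
    (table : PySem.Dict String (Nat × String))
    (htab : ∀ s, PySem.Dict.get? table s =
      pvFind s 0 (rules.map (fun r => (r.1.map PySem.Str.lower, r.2))))
    (symptoms : List String) :
    pvRuleLoopA (symptoms.map PySem.Str.lower) dflt rules =
      (match symptoms.foldl (pvHitStep table) none with
        | none => dflt
        | some best => best.2) := by
  have hfold : symptoms.foldl (pvHitStep table) none =
      pvBmin (fun s => pvFind s 0 (rules.map (fun r => (r.1.map PySem.Str.lower, r.2))))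
        (symptoms.map PySem.Str.lower) := by
    have h1 : pvHitStep table =
        fun b s => pvMinOpt b (PySem.Dict.get? table (PySem.Str.lower s)) :=
      funext fun b => funext fun s => pvHitStep_eq table b s
    rw [h1]
    simp only [htab]
    unfold pvBmin
    rw [List.foldl_map]
  rw [hfold, pvLoop_eq rules 0 dflt (symptoms.map PySem.Str.lower)]
  cases hbm : pvBmin (fun s => pvFind s 0 (rules.map (fun r => (r.1.map PySem.Str.lower, r.2))))
      (symptoms.map PySem.Str.lower) <;> simp

-- per-disease literal rule lists and keyword tables (proof-side names for B's literal sub-dicts)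
def pvRules_cardio : List (List String × String) := [(["chest pain", "chest tightness", "angina"], "Angina"), (["shortness of breath", "palpitations"], "Arrhythmia")]
def pvTbl_cardio : PySem.Dict String (Nat × String) := PySem.Dict.ofList [("chest pain", ((0:Nat), "Angina")), ("chest tightness", ((0:Nat), "Angina")), ("angina", ((0:Nat), "Angina")), ("shortness of breath", ((1:Nat), "Arrhythmia")), ("palpitations", ((1:Nat), "Arrhythmia"))]
def pvRules_hyper : List (List String × String) := [(["headache", "dizziness"], "Hypertensive disorder")]
def pvTbl_hyper : PySem.Dict String (Nat × String) := PySem.Dict.ofList [("headache", ((0:Nat), "Hypertensive disorder")), ("dizziness", ((0:Nat), "Hypertensive disorder"))]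
def pvRules_diab : List (List String × String) := [(["excessive thirst", "frequent urination", "increased hunger"], "Type 2 diabetes")]
def pvTbl_diab : PySem.Dict String (Nat × String) := PySem.Dict.ofList [("excessive thirst", ((0:Nat), "Type 2 diabetes")), ("frequent urination", ((0:Nat), "Type 2 diabetes")), ("increased hunger", ((0:Nat), "Type 2 diabetes"))]
def pvRules_ophth : List (List String × String) := [(["diplopia", "double vision", "ptosis"], "Ocular motor dysfunction")]
def pvTbl_ophth : PySem.Dict String (Nat × String) := PySem.Dict.ofList [("diplopia", ((0:Nat), "Ocular motor dysfunction")), ("double vision", ((0:Nat), "Ocular motor dysfunction")), ("ptosis", ((0:Nat), "Ocular motor dysfunction"))]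
def pvRules_neuro : List (List String × String) := [(["weakness", "numbness", "tingling"], "Peripheral neuropathy"), (["seizure", "epilepsy"], "Epilepsy")]
def pvTbl_neuro : PySem.Dict String (Nat × String) := PySem.Dict.ofList [("weakness", ((0:Nat), "Peripheral neuropathy")), ("numbness", ((0:Nat), "Peripheral neuropathy")), ("tingling", ((0:Nat), "Peripheral neuropathy")), ("seizure", ((1:Nat), "Epilepsy")), ("epilepsy", ((1:Nat), "Epilepsy"))]
def pvRules_auto : List (List String × String) := [(["steroid", "prednisone", "inflammation"], "Steroid-responsive autoimmune")]
def pvTbl_auto : PySem.Dict String (Nat × String) := PySem.Dict.ofList [("steroid", ((0:Nat), "Steroid-responsive autoimmune")), ("prednisone", ((0:Nat), "Steroid-responsive autoimmune")), ("inflammation", ((0:Nat), "Steroid-responsive autoimmune"))]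

theorem pvTab_cardio (s : String) :
    PySem.Dict.get? pvTbl_cardio s = pvFind s 0 (pvRules_cardio.map (fun r => (r.1.map PySem.Str.lower, r.2))) := by
  rw [show pvRules_cardio.map (fun r => (r.1.map PySem.Str.lower, r.2)) = pvRules_cardio from by decide]
  by_cases h0 : s = "chest pain"; · subst h0; decide
  by_cases h1 : s = "chest tightness"; · subst h1; decide
  by_cases h2 : s = "angina"; · subst h2; decide
  by_cases h3 : s = "shortness of breath"; · subst h3; decide
  by_cases h4 : s = "palpitations"; · subst h4; decide
  rw [show pvTbl_cardio = PySem.Dict.mk [("chest pain", ((0:Nat), "Angina")), ("chest tightness", ((0:Nat), "Angina")), ("angina", ((0:Nat), "Angina")), ("shortness of breath", ((1:Nat), "Arrhythmia")), ("palpitations", ((1:Nat), "Arrhythmia"))] from by decide]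
  simp [pvFind, pvRules_cardio, PySem.Dict.get?_mk_cons, h0, h1, h2, h3, h4, Ne.symm h0, Ne.symm h1, Ne.symm h2, Ne.symm h3, Ne.symm h4,
    (PySem.Dict.get?_eq_none_iff_contains (PySem.Dict.mk []) s).mpr rfl]

theorem pvTab_hyper (s : String) :
    PySem.Dict.get? pvTbl_hyper s = pvFind s 0 (pvRules_hyper.map (fun r => (r.1.map PySem.Str.lower, r.2))) := by
  rw [show pvRules_hyper.map (fun r => (r.1.map PySem.Str.lower, r.2)) = pvRules_hyper from by decide]
  by_cases h0 : s = "headache"; · subst h0; decide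
  by_cases h1 : s = "dizziness"; · subst h1; decide
  rw [show pvTbl_hyper = PySem.Dict.mk [("headache", ((0:Nat), "Hypertensive disorder")), ("dizziness", ((0:Nat), "Hypertensive disorder"))] from by decide]
  simp [pvFind, pvRules_hyper, PySem.Dict.get?_mk_cons, h0, h1, Ne.symm h0, Ne.symm h1,
    (PySem.Dict.get?_eq_none_iff_contains (PySem.Dict.mk []) s).mpr rfl]

theorem pvTab_diab (s : String) :
    PySem.Dict.get? pvTbl_diab s = pvFind s 0 (pvRules_diab.map (fun r => (r.1.map PySem.Str.lower, r.2))) := by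
  rw [show pvRules_diab.map (fun r => (r.1.map PySem.Str.lower, r.2)) = pvRules_diab from by decide]
  by_cases h0 : s = "excessive thirst"; · subst h0; decide
  by_cases h1 : s = "frequent urination"; · subst h1; decide
  by_cases h2 : s = "increased hunger"; · subst h2; decide
  rw [show pvTbl_diab = PySem.Dict.mk [("excessive thirst", ((0:Nat), "Type 2 diabetes")), ("frequent urination", ((0:Nat), "Type 2 diabetes")), ("increased hunger", ((0:Nat), "Type 2 diabetes"))] from by decide]
  simp [pvFind, pvRules_diab, PySem.Dict.get?_mk_cons, h0, h1, h2, Ne.symm h0, Ne.symm h1, Ne.symm h2,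
    (PySem.Dict.get?_eq_none_iff_contains (PySem.Dict.mk []) s).mpr rfl]

theorem pvTab_ophth (s : String) :
    PySem.Dict.get? pvTbl_ophth s = pvFind s 0 (pvRules_ophth.map (fun r => (r.1.map PySem.Str.lower, r.2))) := by
  rw [show pvRules_ophth.map (fun r => (r.1.map PySem.Str.lower, r.2)) = pvRules_ophth from by decide]
  by_cases h0 : s = "diplopia"; · subst h0; decide
  by_cases h1 : s = "double vision"; · subst h1; decide
  by_cases h2 : s = "ptosis"; · subst h2; decide
  rw [show pvTbl_ophth = PySem.Dict.mk [("diplopia", ((0:Nat), "Ocular motor dysfunction")), ("double vision", ((0:Nat), "Ocular motor dysfunction")), ("ptosis", ((0:Nat), "Ocular motor dysfunction"))] from by decide]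
  simp [pvFind, pvRules_ophth, PySem.Dict.get?_mk_cons, h0, h1, h2, Ne.symm h0, Ne.symm h1, Ne.symm h2,
    (PySem.Dict.get?_eq_none_iff_contains (PySem.Dict.mk []) s).mpr rfl]

theorem pvTab_neuro (s : String) :
    PySem.Dict.get? pvTbl_neuro s = pvFind s 0 (pvRules_neuro.map (fun r => (r.1.map PySem.Str.lower, r.2))) := by
  rw [show pvRules_neuro.map (fun r => (r.1.map PySem.Str.lower, r.2)) = pvRules_neuro from by decide]
  by_cases h0 : s = "weakness"; · subst h0; decide
  by_cases h1 : s = "numbness"; · subst h1; decide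
  by_cases h2 : s = "tingling"; · subst h2; decide
  by_cases h3 : s = "seizure"; · subst h3; decide
  by_cases h4 : s = "epilepsy"; · subst h4; decide
  rw [show pvTbl_neuro = PySem.Dict.mk [("weakness", ((0:Nat), "Peripheral neuropathy")), ("numbness", ((0:Nat), "Peripheral neuropathy")), ("tingling", ((0:Nat), "Peripheral neuropathy")), ("seizure", ((1:Nat), "Epilepsy")), ("epilepsy", ((1:Nat), "Epilepsy"))] from by decide]
  simp [pvFind, pvRules_neuro, PySem.Dict.get?_mk_cons, h0, h1, h2, h3, h4, Ne.symm h0, Ne.symm h1, Ne.symm h2, Ne.symm h3, Ne.symm h4,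
    (PySem.Dict.get?_eq_none_iff_contains (PySem.Dict.mk []) s).mpr rfl]

theorem pvTab_auto (s : String) :
    PySem.Dict.get? pvTbl_auto s = pvFind s 0 (pvRules_auto.map (fun r => (r.1.map PySem.Str.lower, r.2))) := by
  rw [show pvRules_auto.map (fun r => (r.1.map PySem.Str.lower, r.2)) = pvRules_auto from by decide]
  by_cases h0 : s = "steroid"; · subst h0; decide
  by_cases h1 : s = "prednisone"; · subst h1; decide
  by_cases h2 : s = "inflammation"; · subst h2; decide
  rw [show pvTbl_auto = PySem.Dict.mk [("steroid", ((0:Nat), "Steroid-responsive autoimmune")), ("prednisone", ((0:Nat), "Steroid-responsive autoimmune")), ("inflammation", ((0:Nat), "Steroid-responsive autoimmune"))] from by decide]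
  simp [pvFind, pvRules_auto, PySem.Dict.get?_mk_cons, h0, h1, h2, Ne.symm h0, Ne.symm h1, Ne.symm h2,
    (PySem.Dict.get?_eq_none_iff_contains (PySem.Dict.mk []) s).mpr rfl]

-- ===== VERDICT (by name: the statement is the Claim_ definition above) =====
theorem infer_l3_label_py_spec : Claim_equal_infer_l3_label_py := by
  intro disease symptoms _
  unfold Spec_infer_l3_label_py infer_l3_label_py infer_l3_label_py_alt
  by_cases hd0 : disease = "Cardiovascular Disease"
  · subst hd0
    rw [show PySem.Dict.get? PV_DISEASE_TAXONOMY "Cardiovascular Disease" = some ⟨"Cardiovascular", "Coronary/Cardiac", pvRules_cardio, "Cardiac condition"⟩ from by decide,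
        show PySem.Dict.get? PV_KEYWORD_TABLE "Cardiovascular Disease" = some ("Cardiac condition", pvTbl_cardio) from by decide]
    exact pvEntry_eq pvRules_cardio "Cardiac condition" pvTbl_cardio pvTab_cardio symptoms
  by_cases hd1 : disease = "Hypertension"
  · subst hd1
    rw [show PySem.Dict.get? PV_DISEASE_TAXONOMY "Hypertension" = some ⟨"Cardiovascular", "Hypertension", pvRules_hyper, "Essential hypertension"⟩ from by decide,
        show PySem.Dict.get? PV_KEYWORD_TABLE "Hypertension" = some ("Essential hypertension", pvTbl_hyper) from by decide]
    exact pvEntry_eq pvRules_hyper "Essential hypertension" pvTbl_hyper pvTab_hyper symptoms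
  by_cases hd2 : disease = "Diabetes"
  · subst hd2
    rw [show PySem.Dict.get? PV_DISEASE_TAXONOMY "Diabetes" = some ⟨"Endocrine", "Diabetes", pvRules_diab, "Diabetes (unspecified)"⟩ from by decide,
        show PySem.Dict.get? PV_KEYWORD_TABLE "Diabetes" = some ("Diabetes (unspecified)", pvTbl_diab) from by decide]
    exact pvEntry_eq pvRules_diab "Diabetes (unspecified)" pvTbl_diab pvTab_diab symptoms
  by_cases hd3 : disease = "Ophthalmic Disorder"
  · subst hd3
    rw [show PySem.Dict.get? PV_DISEASE_TAXONOMY "Ophthalmic Disorder" = some ⟨"Ophthalmology", "Neuro-ophthalmic", pvRules_ophth, "Eye disorder"⟩ from by decide,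
        show PySem.Dict.get? PV_KEYWORD_TABLE "Ophthalmic Disorder" = some ("Eye disorder", pvTbl_ophth) from by decide]
    exact pvEntry_eq pvRules_ophth "Eye disorder" pvTbl_ophth pvTab_ophth symptoms
  by_cases hd4 : disease = "Neurological Disorder"
  · subst hd4
    rw [show PySem.Dict.get? PV_DISEASE_TAXONOMY "Neurological Disorder" = some ⟨"Neurology", "Neuromuscular/CNS", pvRules_neuro, "Neurological disorder"⟩ from by decide,
        show PySem.Dict.get? PV_KEYWORD_TABLE "Neurological Disorder" = some ("Neurological disorder", pvTbl_neuro) from by decide]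
    exact pvEntry_eq pvRules_neuro "Neurological disorder" pvTbl_neuro pvTab_neuro symptoms
  by_cases hd5 : disease = "Autoimmune Disorder"
  · subst hd5
    rw [show PySem.Dict.get? PV_DISEASE_TAXONOMY "Autoimmune Disorder" = some ⟨"Immunology", "Autoimmune", pvRules_auto, "Autoimmune disorder"⟩ from by decide,
        show PySem.Dict.get? PV_KEYWORD_TABLE "Autoimmune Disorder" = some ("Autoimmune disorder", pvTbl_auto) from by decide]
    exact pvEntry_eq pvRules_auto "Autoimmune disorder" pvTbl_auto pvTab_auto symptoms
  have hA : PySem.Dict.get? PV_DISEASE_TAXONOMY disease = none := by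
    rw [PySem.Dict.get?_eq_none_iff_not_mem_keys,
        show PV_DISEASE_TAXONOMY.keys = ["Cardiovascular Disease", "Hypertension", "Diabetes", "Ophthalmic Disorder", "Neurological Disorder", "Autoimmune Disorder"] from by decide]
    simp [hd0, hd1, hd2, hd3, hd4, hd5]
  have hB : PySem.Dict.get? PV_KEYWORD_TABLE disease = none := by
    rw [PySem.Dict.get?_eq_none_iff_not_mem_keys,
        show PV_KEYWORD_TABLE.keys = ["Cardiovascular Disease", "Hypertension", "Diabetes", "Ophthalmic Disorder", "Neurological Disorder", "Autoimmune Disorder"] from by decide]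
    simp [hd0, hd1, hd2, hd3, hd4, hd5]
  rw [hA, hB]
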